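-- pv_equiv track=rewrite | github.com/GeorgeKovshov/codewars2 | codewars9.py | tops
-- ===== SOURCE A (Python) =====
-- def tops(msg):
--     i = 1
--     length = len(msg)
--     addition = 2
--     result = []
--     while i < length:
--         result.append(msg[i])
--         #result = msg[i] + result
--         i += addition * 2 + 1
--         addition += 2
--     return "".join(result[::-1])
-- ===== SOURCE B (Python) =====
-- def tops(msg):
--     L = len(msg)
--     # largest n with n*(2*n-1) < L (visited indices are the hexagonal numbers)
--     n = 0
--     while (n + 1) * (2 * n + 1) < L:
--         n += 1
--     out = []
--     while n > 0:
--         out.append(msg[n * (2 * n - 1)])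
--         n -= 1
--     return "".join(out)
-- ===== Notes on version B (the rewrite author's own statement) =====
-- stated objective: simpler
-- what changed: B computes each visited index by the closed form n*(2n-1) (hexagonal numbers): it first finds the count of in-range indices, then builds the output directly back-to-front, replacing A's two mutating accumulators and final list reversal.
import Mathlib
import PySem

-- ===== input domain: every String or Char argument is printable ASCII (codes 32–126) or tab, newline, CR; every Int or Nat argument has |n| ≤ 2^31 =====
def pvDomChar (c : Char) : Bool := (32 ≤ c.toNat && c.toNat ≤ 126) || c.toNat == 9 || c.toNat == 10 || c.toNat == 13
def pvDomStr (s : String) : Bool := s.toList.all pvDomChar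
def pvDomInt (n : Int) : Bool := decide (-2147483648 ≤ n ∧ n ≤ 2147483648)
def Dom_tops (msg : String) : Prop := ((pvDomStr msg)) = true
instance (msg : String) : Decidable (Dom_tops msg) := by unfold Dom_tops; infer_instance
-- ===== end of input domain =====

-- B collects the same characters as A but computes each index by the closed form
-- n*(2n-1) and builds the output back-to-front; objective: simpler (no reversal,
-- no mutating index/step accumulators). Equivalence proved on all inputs.

-- ===== PORT A =====
-- A's while-loop: state (i, addition, result); i starts at 1 and only grows
-- (addition starts at 2 and grows), so both stay nonnegative and are kept as Nat.
def topsLoop (cs : List Char) (i addition : Nat) (result : List Char) : List Char :=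
  if h : i < cs.length then
    topsLoop cs (i + (addition * 2 + 1)) (addition + 2) (result ++ [cs[i]])
  else
    result
termination_by cs.length - i
decreasing_by omega

def tops (msg : String) : String :=
  String.ofList (topsLoop msg.toList 1 2 []).reverse

-- ===== PORT B =====
-- first while-loop of B: largest n with n*(2n-1) < len
def findN (cs : List Char) (n : Nat) : Nat :=
  if (n + 1) * (2 * n + 1) < cs.length then findN cs (n + 1) else n
termination_by cs.length - n
decreasing_by
  rename_i h
  have : n + 1 ≤ (n + 1) * (2 * n + 1) := Nat.le_mul_of_pos_right _ (by omega)
  omega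

-- second while-loop of B: append msg[n*(2n-1)] while n > 0, decrementing n.
-- The index is always in range when reached from findN; getD's default is never used.
def buildDown (cs : List Char) (n : Nat) (out : List Char) : List Char :=
  match n with
  | 0 => out
  | m + 1 => buildDown cs m (out ++ [cs.getD ((m + 1) * (2 * m + 1)) ' '])

def tops_alt (msg : String) : String :=
  String.ofList (buildDown msg.toList (findN msg.toList 0) [])

-- ===== PRECONDITION & SPEC =====
def Spec_tops (msg : String) (out : String) : Prop := out = tops_alt msg
instance (msg : String) (out : String) : Decidable (Spec_tops msg out) := by unfold Spec_tops; infer_instance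

-- ===== CLAIM (what is proved, stated in full; the proofs are below) =====
def Claim_equal_tops : Prop := ∀ (msg : String), Dom_tops msg → Spec_tops msg (tops msg)

-- ===== LEMMAS AND PROOFS =====

-- the character A and B read at step j
def pvF (cs : List Char) (j : Nat) : Char := cs.getD (j * (2 * j - 1)) ' '

-- findN's result N satisfies: (N+1)(2N+1) ≥ len, and every 1 ≤ j ≤ N reached
-- past the start point has j(2j-1) < len.
theorem findN_upper (cs : List Char) (n : Nat) :
    cs.length ≤ (findN cs n + 1) * (2 * findN cs n + 1) := by
  fun_induction findN cs n with
  | case1 n h ih => exact ih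
  | case2 n h => omega

theorem findN_mem (cs : List Char) (n : Nat) :
    ∀ j, n < j → j ≤ findN cs n → j * (2 * j - 1) < cs.length := by
  fun_induction findN cs n with
  | case1 n h ih =>
    intro j hj1 hj2
    rcases Nat.lt_or_ge (n + 1) j with h' | h'
    · exact ih j h' hj2
    · have hj : j = n + 1 := by omega
      subst hj
      have e : (n + 1) * (2 * (n + 1) - 1) = (n + 1) * (2 * n + 1) := by
        have h21 : 2 * (n + 1) - 1 = 2 * n + 1 := by omega
        rw [h21]
      rw [e]; exact h
  | case2 n h =>
    intro j hj1 hj2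
    have hle : findN cs n = n := by
      unfold findN; simp [h]
    omega

-- for 1 ≤ k: k ≤ findN cs 0 ↔ k*(2k-1) < len
theorem le_findN_iff (cs : List Char) (k : Nat) (hk : 1 ≤ k) :
    k ≤ findN cs 0 ↔ k * (2 * k - 1) < cs.length := by
  constructor
  · intro h; exact findN_mem cs 0 k (by omega) h
  · intro h
    by_contra hgt
    have h1 : findN cs 0 + 1 ≤ k := by omega
    have h2 : (findN cs 0 + 1) * (2 * findN cs 0 + 1) ≤ k * (2 * k - 1) :=
      Nat.mul_le_mul h1 (by omega)
    have := findN_upper cs 0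
    omega

-- A's loop from state (k*(2k-1), 2k) appends exactly the characters for j = k..N
theorem topsLoop_eq (cs : List Char) :
    ∀ (d k : Nat), 1 ≤ k → cs.length - k ≤ d → ∀ acc,
      topsLoop cs (k * (2 * k - 1)) (2 * k) acc
        = acc ++ (List.range' k (findN cs 0 + 1 - k)).map (pvF cs) := by
  intro d
  induction d with
  | zero =>
    intro k hk hd acc
    have hkL : cs.length ≤ k := by omega
    have hidx : ¬ k * (2 * k - 1) < cs.length := by
      have : k ≤ k * (2 * k - 1) := Nat.le_mul_of_pos_right _ (by omega)
      omega
    have hN : ¬ k ≤ findN cs 0 := by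
      intro h; exact hidx ((le_findN_iff cs k hk).mp h)
    unfold topsLoop
    simp [hidx, Nat.sub_eq_zero_of_le (by omega : findN cs 0 + 1 ≤ k)]
  | succ d ih =>
    intro k hk hd acc
    by_cases hidx : k * (2 * k - 1) < cs.length
    · have hkN : k ≤ findN cs 0 := (le_findN_iff cs k hk).mpr hidx
      have hstep : k * (2 * k - 1) + (2 * k * 2 + 1) = (k + 1) * (2 * (k + 1) - 1) := by
        have h1 : 2 * k - 1 + 1 = 2 * k := by omega
        have h2 : 2 * (k + 1) - 1 = 2 * k + 1 := by omega
        nlinarith [Nat.sub_add_cancel (by omega : 1 ≤ 2 * k)]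
      have hkL : k < cs.length := by
        have : k ≤ k * (2 * k - 1) := Nat.le_mul_of_pos_right _ (by omega)
        omega
      unfold topsLoop
      rw [dif_pos hidx]
      rw [hstep]
      have h2k2 : 2 * k + 2 = 2 * (k + 1) := by ring
      rw [h2k2]
      rw [ih (k + 1) (by omega) (by omega) (acc ++ [cs[k * (2 * k - 1)]'hidx])]
      have hrange : List.range' k (findN cs 0 + 1 - k)
          = k :: List.range' (k + 1) (findN cs 0 + 1 - (k + 1)) := by
        have : findN cs 0 + 1 - k = (findN cs 0 + 1 - (k + 1)) + 1 := by omega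
        rw [this, List.range'_succ]
      rw [hrange]
      simp [pvF, List.getD, List.getElem?_eq_getElem hidx]
    · have hN : ¬ k ≤ findN cs 0 := by
        intro h; exact hidx ((le_findN_iff cs k hk).mp h)
      unfold topsLoop
      simp [hidx, Nat.sub_eq_zero_of_le (by omega : findN cs 0 + 1 ≤ k)]

-- B's descending loop builds the reverse of the ascending map
theorem buildDown_eq (cs : List Char) :
    ∀ (n : Nat) (out : List Char),
      buildDown cs n out = out ++ ((List.range' 1 n).map (pvF cs)).reverse := by
  intro n
  induction n with
  | zero => intro out; simp [buildDown]
  | succ m ih =>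
    intro out
    unfold buildDown
    rw [ih]
    have : List.range' 1 (m + 1) = List.range' 1 m ++ [m + 1] := by
      rw [List.range'_concat]
      simp [Nat.add_comm]
    rw [this]
    have hidx : (m + 1) * (2 * m + 1) = (m + 1) * (2 * (m + 1) - 1) := by
      have : 2 * (m + 1) - 1 = 2 * m + 1 := by omega
      rw [this]
    simp [pvF, hidx]

-- ===== VERDICT (by name: the statement is the Claim_ definition above) =====
theorem tops_spec : Claim_equal_tops := by
  intro msg _
  unfold Spec_tops tops tops_alt
  have hA := topsLoop_eq msg.toList (msg.toList.length) 1 (by omega) (by omega) []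
  have h1 : (1 : Nat) * (2 * 1 - 1) = 1 := by norm_num
  rw [h1] at hA
  rw [hA, buildDown_eq]
  simp
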